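-- pv_equiv track=rewrite | github.com/anolkurian/CNS_Project | hash.py | _common_substring
-- ===== SOURCE A (Python) =====
-- class _RollState(object):
-- 	ROLL_WINDOW = 7
--
-- 	def __init__(self):
-- 		self.win = bytearray(self.ROLL_WINDOW)
-- 		self.h1 = int()
-- 		self.h2 = int()
-- 		self.h3 = int()
-- 		self.n = int()
--
-- 	def roll_hash(self, b):
-- 		self.h2 = self.h2 - self.h1 + (self.ROLL_WINDOW * b)
-- 		self.h1 = self.h1 + b - self.win[self.n % self.ROLL_WINDOW]
-- 		self.win[self.n % self.ROLL_WINDOW] = b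
-- 		self.n += 1
-- 		self.h3 = (self.h3 << 5) & 0xFFFFFFFF
-- 		self.h3 ^= b
-- 		return self.h1 + self.h2 + self.h3
--
-- def _common_substring(s1, s2):
-- 	ROLL_WINDOW = 7
-- 	hashes = list()
--
-- 	roll = _RollState()
-- 	for i in range(len(s1)):
-- 		b = ord(s1[i])
-- 		hashes.append(roll.roll_hash(b))
--
-- 	roll = _RollState()
-- 	for i in range(len(s2)):
-- 		b = ord(s2[i])
-- 		rh = roll.roll_hash(b)
-- 		if i < (ROLL_WINDOW - 1):
-- 			continue
-- 		for j in range(ROLL_WINDOW-1, len(hashes)):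
-- 			if hashes[j] != 0 and hashes[j] == rh:
-- 				ir = i - (ROLL_WINDOW - 1)
-- 				jr = j - (ROLL_WINDOW - 1)
-- 				if (len(s2[ir:]) >= ROLL_WINDOW and
-- 					s2[ir:ir+ROLL_WINDOW] == s1[jr:jr+ROLL_WINDOW]):
-- 					return True
-- 	return False
-- ===== SOURCE B (Python) =====
-- def _common_substring(s1, s2):
--     ROLL_WINDOW = 7
--
--     def _roll_hashes(s):
--         win = [0] * ROLL_WINDOW
--         h1 = h2 = h3 = 0
--         out = []
--         for n in range(len(s)):
--             b = ord(s[n])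
--             h2 = h2 - h1 + ROLL_WINDOW * b
--             h1 = h1 + b - win[n % ROLL_WINDOW]
--             win[n % ROLL_WINDOW] = b
--             h3 = ((h3 << 5) & 0xFFFFFFFF) ^ b
--             out.append(h1 + h2 + h3)
--         return out
--
--     # index of s1: hash value -> window-start positions (only full windows, nonzero hash)
--     index = {}
--     for j, h in enumerate(_roll_hashes(s1)):
--         if j >= ROLL_WINDOW - 1 and h != 0:
--             index.setdefault(h, []).append(j - (ROLL_WINDOW - 1))
--
--     for i, rh in enumerate(_roll_hashes(s2)):
--         if i >= ROLL_WINDOW - 1: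
--             ir = i - (ROLL_WINDOW - 1)
--             sub2 = s2[ir:ir + ROLL_WINDOW]
--             for jr in index.get(rh, []):
--                 if s1[jr:jr + ROLL_WINDOW] == sub2:
--                     return True
--     return False
-- ===== Notes on version B (the rewrite author's own statement) =====
-- stated objective: alternative
-- what changed: B indexes s1's full-window nonzero rolling hashes in a dict (hash value -> list of window starts) built once, then checks each s2 window by a dict lookup plus substring comparison, replacing A's inner scan over all s1 window hashes at every s2 position.
import Mathlib
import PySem

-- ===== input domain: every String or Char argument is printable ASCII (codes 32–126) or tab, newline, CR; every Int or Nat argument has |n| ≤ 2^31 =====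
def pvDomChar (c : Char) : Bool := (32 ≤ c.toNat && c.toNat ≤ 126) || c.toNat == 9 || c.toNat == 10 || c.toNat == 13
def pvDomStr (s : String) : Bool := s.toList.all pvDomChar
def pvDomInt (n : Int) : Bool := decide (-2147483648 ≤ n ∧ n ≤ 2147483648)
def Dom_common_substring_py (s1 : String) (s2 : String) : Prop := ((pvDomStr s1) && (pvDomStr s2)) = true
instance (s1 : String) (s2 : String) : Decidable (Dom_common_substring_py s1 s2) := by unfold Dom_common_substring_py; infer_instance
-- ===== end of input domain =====

-- B replaces A's inner O(n) scan over all s1 window hashes by a dict (hash -> window starts)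
-- built once from s1, so each s2 window is checked by a lookup; same Boolean result.
-- String slicing/comparison is ported on List Char (exact: code-point lists).

-- ===== PORT A =====
-- _RollState: win (bytearray of 7), h1 h2 (ints), h3 (nonneg, masked to 32 bits), n (counter)
structure PvRoll where
  win : List Nat
  h1 : Int
  h2 : Int
  h3 : Nat
  n : Nat
deriving Repr, DecidableEq

def pvRollInit : PvRoll := ⟨List.replicate 7 0, 0, 0, 0, 0⟩

-- roll_hash(b): exact transliteration; '(h3 << 5) & 0xFFFFFFFF' and '^' on nonneg ints are Nat <<< / &&& / ^^^
def pvRollStep (r : PvRoll) (b : Nat) : PvRoll × Int :=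
  let h2 := r.h2 - r.h1 + 7 * (b : Int)
  let h1 := r.h1 + (b : Int) - ((r.win.getD (r.n % 7) 0 : Nat) : Int)
  let win := r.win.set (r.n % 7) b
  let h3 := ((r.h3 <<< 5) &&& 0xFFFFFFFF) ^^^ b
  (⟨win, h1, h2, h3, r.n + 1⟩, h1 + h2 + (h3 : Int))

-- the list of roll_hash values of a string (A's first loop; also the values A's second loop sees)
def pvRollHashes (r : PvRoll) (cs : List Char) : List Int :=
  match cs with
  | [] => []
  | c :: cs => let p := pvRollStep r c.toNat
               p.2 :: pvRollHashes p.1 cs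

-- A's inner loop over j in range(6, len(hashes)) with early return True
def pvAInner (hashes : List Int) (rh : Int) (i : Int) (l1 l2 : List Char) : Bool :=
  (PySem.List.pyRange 6 (PySem.List.len hashes) 1).any (fun j =>
    PySem.List.pyGetD hashes j 0 != 0 && PySem.List.pyGetD hashes j 0 == rh &&
      (decide (7 ≤ (PySem.List.slice l2 (some (i - 6)) none).length) &&
       PySem.List.slice l2 (some (i - 6)) (some (i - 6 + 7)) ==
         PySem.List.slice l1 (some (j - 6)) (some (j - 6 + 7))))

-- A's second loop: rolls the state over s2, skips i < 6, early-returns on a hit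
def pvALoop (hashes : List Int) (l1 l2 : List Char) (cs : List Char) (r : PvRoll) (i : Int) : Bool :=
  match cs with
  | [] => false
  | c :: cs =>
    let p := pvRollStep r c.toNat
    if i < 6 then pvALoop hashes l1 l2 cs p.1 (i + 1)
    else if pvAInner hashes p.2 i l1 l2 then true
    else pvALoop hashes l1 l2 cs p.1 (i + 1)

def common_substring_py (s1 : String) (s2 : String) : Bool :=
  let l1 := s1.toList
  let l2 := s2.toList
  let hashes := pvRollHashes pvRollInit l1
  pvALoop hashes l1 l2 l2 pvRollInit 0

-- ===== PORT B =====
-- index.setdefault(h, []).append(jr)  =  modify h [] (· ++ [jr])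
def pvBIndex (hs1 : List Int) : PySem.Dict Int (List Int) :=
  (PySem.List.enumerate hs1 0).foldl
    (fun d p => if 6 ≤ p.1 ∧ p.2 ≠ 0 then d.modify p.2 [] (· ++ [p.1 - 6]) else d)
    PySem.Dict.empty

def common_substring_py_alt (s1 : String) (s2 : String) : Bool :=
  let l1 := s1.toList
  let l2 := s2.toList
  let index := pvBIndex (pvRollHashes pvRollInit l1)
  (PySem.List.enumerate (pvRollHashes pvRollInit l2) 0).any (fun p =>
    decide (6 ≤ p.1) &&
      (let sub2 := PySem.List.slice l2 (some (p.1 - 6)) (some (p.1 - 6 + 7))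
       (index.getD p.2 []).any (fun jr =>
         PySem.List.slice l1 (some jr) (some (jr + 7)) == sub2)))

-- ===== PRECONDITION & SPEC =====
def Spec_common_substring_py (s1 : String) (s2 : String) (out : Bool) : Prop := out = common_substring_py_alt s1 s2
instance (s1 : String) (s2 : String) (out : Bool) : Decidable (Spec_common_substring_py s1 s2 out) := by unfold Spec_common_substring_py; infer_instance

-- ===== CLAIM (what is proved, stated in full; the proofs are below) =====
def Claim_equal_common_substring_py : Prop := ∀ (s1 : String) (s2 : String), Dom_common_substring_py s1 s2 → Spec_common_substring_py s1 s2 (common_substring_py s1 s2)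

-- ===== LEMMAS AND PROOFS =====

theorem pvRollHashes_length (r : PvRoll) (cs : List Char) :
    (pvRollHashes r cs).length = cs.length := by
  induction cs generalizing r with
  | nil => rfl
  | cons c cs ih => simp [pvRollHashes, ih]

-- A's stateful loop, characterized as an 'any' over the enumerated hash list
theorem pvALoop_eq_any (hashes : List Int) (l1 l2 cs : List Char) (r : PvRoll) (i : Int) :
    pvALoop hashes l1 l2 cs r i =
      (PySem.List.enumerate (pvRollHashes r cs) i).any
        (fun p => !decide (p.1 < 6) && pvAInner hashes p.2 p.1 l1 l2) := by
  induction cs generalizing r i with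
  | nil => rfl
  | cons c cs ih =>
    simp only [pvALoop, pvRollHashes, PySem.List.enumerate_cons, List.any_cons]
    by_cases h : i < 6
    · simp [h, ih]
    · by_cases hin : pvAInner hashes (pvRollStep r c.toNat).2 i l1 l2
      · simp [h, hin]
      · simp [h, hin, ih]

-- index characterization: the position list stored under a hash value
theorem pvBIndex_getD (hs1 : List Int) (rh : Int) :
    (pvBIndex hs1).getD rh [] =
      (((PySem.List.enumerate hs1 0).filter
          (fun p => decide (6 ≤ p.1 ∧ p.2 ≠ 0) && p.2 == rh)).map (fun p => p.1 - 6)) := by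
  unfold pvBIndex
  have h1 : (PySem.List.enumerate hs1 0).foldl
      (fun d p => if 6 ≤ p.1 ∧ p.2 ≠ 0 then d.modify p.2 [] (· ++ [p.1 - 6]) else d)
      PySem.Dict.empty
      = ((PySem.List.enumerate hs1 0).filter (fun p => decide (6 ≤ p.1 ∧ p.2 ≠ 0))).foldl
          (fun d p => d.modify p.2 [] (· ++ [p.1 - 6])) PySem.Dict.empty := by
    rw [List.foldl_filter]
    simp only [decide_eq_true_eq]
  have h2 : (((PySem.List.enumerate hs1 0).filter (fun p => decide (6 ≤ p.1 ∧ p.2 ≠ 0))).map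
        (fun (p : Int × Int) => (p.2, p.1 - 6))).foldl
        (fun (d : PySem.Dict Int (List Int)) q => d.modify q.1 [] (· ++ [q.2])) PySem.Dict.empty
      = ((PySem.List.enumerate hs1 0).filter (fun p => decide (6 ≤ p.1 ∧ p.2 ≠ 0))).foldl
        (fun d p => d.modify p.2 [] (· ++ [p.1 - 6])) PySem.Dict.empty := by
    rw [List.foldl_map]
  rw [h1, ← h2, PySem.Dict.getD_foldl_modify_append]
  simp only [PySem.Dict.getD_empty, List.nil_append, List.filter_map, List.map_map,
    List.filter_filter, Function.comp]
  congr 1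
  apply List.filter_congr
  intro p _
  simp only [Bool.and_comm]

-- the two inner scans agree for a full s2 window (6 ≤ i < len l2)
theorem pvInner_eq (l1 l2 : List Char) (rh : Int) (i : Int)
    (h6 : 6 ≤ i) (hlt : i < (l2.length : Int)) :
    pvAInner (pvRollHashes pvRollInit l1) rh i l1 l2 =
      ((pvBIndex (pvRollHashes pvRollInit l1)).getD rh []).any (fun jr =>
        PySem.List.slice l1 (some jr) (some (jr + 7)) ==
          PySem.List.slice l2 (some (i - 6)) (some (i - 6 + 7))) := by
  set hs1 := pvRollHashes pvRollInit l1 with hhs1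
  have hlen : hs1.length = l1.length := pvRollHashes_length _ _
  have hlc : decide (7 ≤ (PySem.List.slice l2 (some (i - 6)) none).length) = true := by
    rw [PySem.List.slice_from l2 (show (0:Int) ≤ i - 6 by omega)]
    simp only [List.length_drop, decide_eq_true_eq]
    omega
  rw [Bool.eq_iff_iff]
  rw [pvBIndex_getD]
  simp only [pvAInner, hlc, List.any_eq_true, List.mem_map, List.mem_filter,
    PySem.List.mem_pyRange_one, PySem.List.mem_enumerate_iff, PySem.List.len_eq,
    Bool.and_eq_true, bne_iff_ne, beq_iff_eq, decide_eq_true_eq, ne_eq, true_and]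
  constructor
  · rintro ⟨j, ⟨hj6, hjlt⟩, ⟨hne, heq⟩, hsl⟩
    rw [PySem.List.pyGetD_eq_getElem hs1 0 (by omega) hjlt] at hne heq
    refine ⟨j - 6, ⟨((j.toNat : Int), hs1[j.toNat]'(by omega)), ⟨⟨j.toNat, ?_, ?_⟩, ⟨?_, hne⟩, heq⟩, ?_⟩, hsl.symm⟩
    · omega
    · simp only [zero_add]
    · show 6 ≤ (j.toNat : Int)
      omega
    · show (j.toNat : Int) - 6 = j - 6
      omega
  · rintro ⟨jr, ⟨p, ⟨⟨k, hk, hpk⟩, ⟨hp6, hne⟩, heq⟩, hjr⟩, hsl⟩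
    subst hpk
    simp only [zero_add] at hp6 hne heq hjr
    refine ⟨(k : Int), ⟨by omega, by omega⟩, ?_, ?_⟩
    · rw [PySem.List.pyGetD_eq_getElem hs1 0 (by omega) (by exact_mod_cast hk)]
      simpa using ⟨hne, heq⟩
    · subst hjr
      exact hsl.symm

theorem pvAny_congr_mem {α : Type} {l : List α} {f g : α → Bool}
    (h : ∀ a ∈ l, f a = g a) : l.any f = l.any g := by
  induction l with
  | nil => rfl
  | cons a l ih => simp [List.any_cons, h a (by simp), ih (fun b hb => h b (by simp [hb]))]

-- ===== VERDICT (by name: the statement is the Claim_ definition above) =====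
theorem common_substring_py_spec : Claim_equal_common_substring_py := by
  intro s1 s2 _
  unfold Spec_common_substring_py common_substring_py common_substring_py_alt
  rw [pvALoop_eq_any]
  apply pvAny_congr_mem
  intro p hp
  rw [PySem.List.mem_enumerate_iff] at hp
  obtain ⟨k, hk, rfl⟩ := hp
  simp only [zero_add]
  by_cases h6 : 6 ≤ (k : Int)
  · have hlt : (k : Int) < (s2.toList.length : Int) := by
      rw [pvRollHashes_length] at hk; exact_mod_cast hk
    rw [pvInner_eq s1.toList s2.toList _ _ h6 hlt]
    simp [h6, not_lt.mpr h6]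
  · simp [h6, show ((k:Int) < 6) from by omega]
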